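-- pv_equiv track=rewrite | github.com/fossil-fishhhooks/RebuiltStreamScouting | path_stitcher.py | apply_remap
-- ===== SOURCE A (Python) =====
-- from typing import Dict, List, Optional, Tuple
--
-- def apply_remap(d: dict, remap: Dict[int, int]) -> dict:
--     """
--     Return a new dict where any key that appears in remap is replaced by its
--     canonical ID.  Values for the same canonical ID are merged as lists.
--     """
--     out: dict = {}
--     for k, v in d.items():
--         canon = remap.get(k, k)
--         if canon in out:
--             if isinstance(v, list) and isinstance(out[canon], list):
--                 out[canon] = out[canon] + v
--             # else keep existing (first write wins for non-lists)
--         else: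
--             out[canon] = v
--     return out
-- ===== SOURCE B (Python) =====
-- def apply_remap(d: dict, remap) -> dict:
--     # Two passes: group values by canonical id, then fold each group.
--     groups: dict = {}
--     for k, v in d.items():
--         groups.setdefault(remap.get(k, k), []).append(v)
--     out: dict = {}
--     for canon, vs in groups.items():
--         acc = vs[0]
--         for v in vs[1:]:
--             if isinstance(acc, list) and isinstance(v, list):
--                 acc = acc + v
--         out[canon] = acc
--     return out
-- ===== Notes on version B (the rewrite author's own statement) =====
-- stated objective: alternative
-- what changed: A merges values into the output dict incrementally as each key is encountered; B first builds a grouping table from canonical id to the list of its incoming values (setdefault/append) and then, in a second pass, folds each group's value list into one merged value.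
import Mathlib
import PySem

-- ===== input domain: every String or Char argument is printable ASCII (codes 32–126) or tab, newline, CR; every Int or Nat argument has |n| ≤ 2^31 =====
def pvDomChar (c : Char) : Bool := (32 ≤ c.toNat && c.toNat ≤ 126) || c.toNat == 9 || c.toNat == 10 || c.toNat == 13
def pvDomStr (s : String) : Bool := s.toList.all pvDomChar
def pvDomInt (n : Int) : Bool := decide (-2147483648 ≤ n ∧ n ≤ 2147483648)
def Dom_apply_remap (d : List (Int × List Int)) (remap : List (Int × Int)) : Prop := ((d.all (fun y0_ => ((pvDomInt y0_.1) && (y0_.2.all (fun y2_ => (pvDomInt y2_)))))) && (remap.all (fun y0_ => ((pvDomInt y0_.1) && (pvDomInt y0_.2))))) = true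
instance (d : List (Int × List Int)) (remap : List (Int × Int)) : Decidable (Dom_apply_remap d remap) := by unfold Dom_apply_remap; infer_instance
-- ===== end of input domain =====

-- B replaces A's incremental merge-as-you-go with a two-pass group-then-fold decomposition (objective: alternative).

-- remap.get(k, k)
def pvCanon (remap : List (Int × Int)) (k : Int) : Int :=
  (PySem.Dict.mk remap).getD k k

-- ===== PORT A =====
-- one pass: merge into `out` as keys are encountered (isinstance checks are
-- always true at value type List Int, so the merge branch always concatenates)
def apply_remap (d : List (Int × List Int)) (remap : List (Int × Int)) : List (Int × List Int) :=
  (d.foldl (fun out kv =>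
      let canon := pvCanon remap kv.1
      if out.contains canon then
        out.insert canon (out.getD canon [] ++ kv.2)
      else
        out.insert canon kv.2)
    (PySem.Dict.empty : PySem.Dict Int (List Int))).items

-- ===== PORT B =====
-- pass 1: group incoming values by canonical id (setdefault(canon, []).append(v))
def pvGroups (d : List (Int × List Int)) (remap : List (Int × Int)) : PySem.Dict Int (List (List Int)) :=
  d.foldl (fun g kv => g.modify (pvCanon remap kv.1) [] (· ++ [kv.2])) PySem.Dict.empty
-- pass 2: fold each group: acc = vs[0], then acc = acc + v for the rest
-- (the isinstance guards of Source B are always true at value type List Int;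
--  vs = [] is unreachable — every group holds at least one value)
def apply_remap_alt (d : List (Int × List Int)) (remap : List (Int × Int)) : List (Int × List Int) :=
  ((pvGroups d remap).items.foldl (fun out cv =>
      match cv.2 with
      | [] => out
      | v0 :: rest => out.insert cv.1 (rest.foldl (· ++ ·) v0))
    (PySem.Dict.empty : PySem.Dict Int (List Int))).items

-- ===== PRECONDITION & SPEC =====
def Spec_apply_remap (d : List (Int × List Int)) (remap : List (Int × Int)) (out : List (Int × List Int)) : Prop := out = apply_remap_alt d remap
instance (d : List (Int × List Int)) (remap : List (Int × Int)) (out : List (Int × List Int)) : Decidable (Spec_apply_remap d remap out) := by unfold Spec_apply_remap; infer_instance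

-- ===== CLAIM (what is proved, stated in full; the proofs are below) =====
def Claim_equal_apply_remap : Prop := ∀ (d : List (Int × List Int)) (remap : List (Int × Int)), Dom_apply_remap d remap → Spec_apply_remap d remap (apply_remap d remap)

-- ===== LEMMAS AND PROOFS =====

-- A's branch collapses: on a fresh key getD gives [] and [] ++ v = v.
theorem pvStepA (out : PySem.Dict Int (List Int)) (c : Int) (v : List Int) :
    (if out.contains c then out.insert c (out.getD c [] ++ v) else out.insert c v)
      = out.insert c (out.getD c [] ++ v) := by
  by_cases h : out.contains c = true
  · simp [h]
  · simp only [Bool.not_eq_true] at h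
    rw [PySem.Dict.getD_of_not_contains out [] h]
    simp [h]

-- value map relation transported through get? (on raw item lists)
theorem pvGetMk (l : List (Int × List (List Int))) (c : Int) :
    (PySem.Dict.mk (l.map (fun p => (p.1, p.2.flatten)))).get? c
      = ((PySem.Dict.mk l).get? c).map List.flatten := by
  induction l with
  | nil => rfl
  | cons p rest ih =>
    obtain ⟨k, vv⟩ := p
    simp only [List.map_cons]
    by_cases h : k == c <;>
      simp [PySem.Dict.get?_mk_cons, h, ih]

theorem pvGetDRel (g : PySem.Dict Int (List (List Int))) (out : PySem.Dict Int (List Int))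
    (hrel : out.items = g.items.map (fun p => (p.1, p.2.flatten))) (c : Int) :
    out.getD c [] = (g.getD c []).flatten := by
  have h1 : out.get? c = (g.get? c).map List.flatten := by
    have : out = PySem.Dict.mk (g.items.map (fun p => (p.1, p.2.flatten))) := by
      apply PySem.Dict.ext; exact hrel
    rw [this]
    exact pvGetMk g.items c
  rw [PySem.Dict.getD_eq_get?_getD, PySem.Dict.getD_eq_get?_getD, h1]
  cases g.get? c <;> simp

theorem pvContainsRel (g : PySem.Dict Int (List (List Int))) (out : PySem.Dict Int (List Int))
    (hrel : out.items = g.items.map (fun p => (p.1, p.2.flatten))) (c : Int) :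
    out.contains c = g.contains c := by
  have hk : out.keys = g.keys := by
    simp only [PySem.Dict.keys, hrel, List.map_map]; rfl
  rw [PySem.Dict.contains_eq_decide_mem_keys, PySem.Dict.contains_eq_decide_mem_keys, hk]

-- one step of the loops preserves the relation
theorem pvStepRel (g : PySem.Dict Int (List (List Int))) (out : PySem.Dict Int (List Int))
    (hrel : out.items = g.items.map (fun p => (p.1, p.2.flatten))) (c : Int) (v : List Int) :
    (out.insert c (out.getD c [] ++ v)).items
      = (g.insert c (g.getD c [] ++ [v])).items.map (fun p => (p.1, p.2.flatten)) := by
  have hgd := pvGetDRel g out hrel c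
  have hct := pvContainsRel g out hrel c
  have hval : out.getD c [] ++ v = (g.getD c [] ++ [v]).flatten := by
    simp [hgd]
  by_cases h : g.contains c = true
  · rw [PySem.Dict.items_insert_of_contains _ _ (hct ▸ h),
        PySem.Dict.items_insert_of_contains _ _ h, hrel, List.map_map, List.map_map]
    apply List.map_congr_left
    intro p _
    by_cases hp : p.1 = c <;> simp [hp, hgd]
  · simp only [Bool.not_eq_true] at h
    rw [PySem.Dict.items_insert_of_not_contains _ _ (hct ▸ h),
        PySem.Dict.items_insert_of_not_contains _ _ h, hrel, List.map_append]
    simp [hval]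

-- main invariant: A's running dict is the flatten-image of B's grouping dict
theorem pvInv (remap : List (Int × Int)) (d : List (Int × List Int))
    (g : PySem.Dict Int (List (List Int))) (out : PySem.Dict Int (List Int))
    (hrel : out.items = g.items.map (fun p => (p.1, p.2.flatten))) :
    (d.foldl (fun out kv =>
        let canon := pvCanon remap kv.1
        if out.contains canon then
          out.insert canon (out.getD canon [] ++ kv.2)
        else
          out.insert canon kv.2) out).items
      = (d.foldl (fun g kv => g.modify (pvCanon remap kv.1) [] (· ++ [kv.2])) g).items.map
          (fun p => (p.1, p.2.flatten)) := by
  induction d generalizing g out with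
  | nil => simpa using hrel
  | cons kv rest ih =>
    simp only [List.foldl_cons]
    rw [pvStepA]
    exact ih _ _ (pvStepRel g out hrel (pvCanon remap kv.1) kv.2)

-- every group is nonempty (each value was inserted as … ++ [v])
theorem pvGroupsNonempty (remap : List (Int × Int)) (d : List (Int × List Int))
    (g : PySem.Dict Int (List (List Int))) (hg : ∀ p ∈ g.items, p.2 ≠ []) :
    ∀ p ∈ (d.foldl (fun g kv => g.modify (pvCanon remap kv.1) [] (· ++ [kv.2])) g).items, p.2 ≠ [] := by
  induction d generalizing g with
  | nil => exact hg
  | cons kv rest ih =>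
    simp only [List.foldl_cons]
    apply ih
    intro p hp
    have : p = (pvCanon remap kv.1, g.getD (pvCanon remap kv.1) [] ++ [kv.2]) ∨
        (p ∈ g.items ∧ p.1 ≠ pvCanon remap kv.1) :=
      (PySem.Dict.mem_items_insert _ _ _ _).mp hp
    rcases this with h | ⟨h, _⟩
    · subst h; simp
    · exact hg p h

-- acc = vs[0]; acc = acc + v over the rest  ≡  flatten
theorem pvFoldFlatten (v0 : List Int) (rest : List (List Int)) :
    rest.foldl (· ++ ·) v0 = (v0 :: rest).flatten := by
  induction rest generalizing v0 with
  | nil => simp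
  | cons w ws ih => simp [ih, List.append_assoc]

theorem pvKeysNodupGroups (remap : List (Int × Int)) (d : List (Int × List Int)) :
    (pvGroups d remap).keys.Nodup := by
  unfold pvGroups
  exact PySem.Dict.nodup_keys_foldl_modify_key d (fun kv => pvCanon remap kv.1) [] _ _
    PySem.Dict.nodup_keys_empty

-- ===== VERDICT (by name: the statement is the Claim_ definition above) =====
theorem apply_remap_spec : Claim_equal_apply_remap := by
  intro d remap _
  show apply_remap d remap = apply_remap_alt d remap
  unfold apply_remap apply_remap_alt
  have hinv := pvInv remap d PySem.Dict.empty PySem.Dict.empty (by rfl)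
  rw [hinv]
  have hne := pvGroupsNonempty remap d PySem.Dict.empty (by intro p hp; exact absurd hp List.not_mem_nil)
  -- rewrite the pass-2 loop body using nonemptiness of every group
  have hcongr : (pvGroups d remap).items.foldl (fun out cv =>
        match cv.2 with
        | [] => out
        | v0 :: rest => out.insert cv.1 (rest.foldl (· ++ ·) v0))
      (PySem.Dict.empty : PySem.Dict Int (List Int))
      = (pvGroups d remap).items.foldl (fun out cv => out.insert cv.1 cv.2.flatten)
      (PySem.Dict.empty : PySem.Dict Int (List Int)) := by
    apply PySem.List.foldl_congr_mem
    intro out cv hcv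
    have : cv.2 ≠ [] := hne cv hcv
    cases h : cv.2 with
    | nil => exact absurd h this
    | cons v0 rest => simp [pvFoldFlatten]
  rw [hcongr]
  have hfresh := PySem.Dict.items_foldl_insert_fresh
    (l := (pvGroups d remap).items) (k := fun p => p.1) (v := fun p => p.2.flatten)
    (d := (PySem.Dict.empty : PySem.Dict Int (List Int)))
    (by intro a _; exact PySem.Dict.contains_empty _)
    (by simpa [PySem.Dict.keys] using pvKeysNodupGroups remap d)
  rw [hfresh]
  simp only [pvGroups]
  rfl
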